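-- pv_equiv track=rewrite | github.com/hanimugiwara/THM-INDU-CTF | Scripts/Python/modbus_register_hunter.py | registers_to_ascii
-- ===== SOURCE A (Python) =====
-- def registers_to_ascii(registers):
--     """Convert register values to ASCII string"""
--     try:
--         ascii_chars = []
--         for reg in registers:
--             # Each register is 16 bits, split into 2 bytes
--             high_byte = (reg >> 8) & 0xFF
--             low_byte = reg & 0xFF
--
--             # Convert to ASCII if printable
--             if 32 <= high_byte <= 126:
--                 ascii_chars.append(chr(high_byte))
--             else:
--                 ascii_chars.append('.')
--
--             if 32 <= low_byte <= 126:
--                 ascii_chars.append(chr(low_byte))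
--             else:
--                 ascii_chars.append('.')
--
--         return ''.join(ascii_chars)
--     except:
--         return ""
-- ===== SOURCE B (Python) =====
-- def registers_to_ascii(registers):
--     """Convert register values to ASCII string"""
--     try:
--         table = bytes(i if 32 <= i <= 126 else 46 for i in range(256))
--         buf = bytearray()
--         for reg in registers:
--             buf.append((reg >> 8) & 0xFF)
--             buf.append(reg & 0xFF)
--         return bytes(buf).translate(table).decode('ascii')
--     except:
--         return ""
-- ===== Notes on version B (the rewrite author's own statement) =====
-- stated objective: idiomatic
-- what changed: Replaces the per-character if/else branching loop that appends chars to a list with a byte buffer built in one pass plus a precomputed 256-entry translation table applied via bytes.translate, the way an experienced Python developer would sanitise bytes to printable ASCII.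
import Mathlib
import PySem

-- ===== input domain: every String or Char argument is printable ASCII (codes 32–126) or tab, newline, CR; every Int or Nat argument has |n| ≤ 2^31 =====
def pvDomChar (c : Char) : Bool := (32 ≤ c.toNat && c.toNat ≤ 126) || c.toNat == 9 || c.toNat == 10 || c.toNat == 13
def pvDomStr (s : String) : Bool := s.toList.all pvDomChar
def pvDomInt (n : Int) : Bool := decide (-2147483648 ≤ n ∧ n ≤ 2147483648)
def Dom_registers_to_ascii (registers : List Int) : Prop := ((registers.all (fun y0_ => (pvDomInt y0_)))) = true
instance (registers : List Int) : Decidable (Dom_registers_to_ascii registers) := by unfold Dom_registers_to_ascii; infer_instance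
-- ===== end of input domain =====

-- B replaces A's per-character if/else append loop with a byte buffer plus a precomputed
-- 256-entry translation table (bytes.translate), a more idiomatic decomposition; same O(n) cost.
-- A's try/except never fires on integer input, so both ports are the normal path.

-- ===== PORT A =====
def registers_to_ascii (registers : List Int) : String :=
  String.mk (registers.foldl (fun (acc : List Char) (reg : Int) =>
    let high_byte := PySem.Int.band ((reg >>> (8 : Nat) : Int)) 255
    let low_byte := PySem.Int.band reg 255
    let acc := acc ++ [if 32 ≤ high_byte ∧ high_byte ≤ 126 then Char.ofNat high_byte.toNat else '.']
    acc ++ [if 32 ≤ low_byte ∧ low_byte ≤ 126 then Char.ofNat low_byte.toNat else '.']) [])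

-- ===== PORT B =====
-- the 256-entry translation table: indices 32..126 map to themselves, everything else to '.'
def pvTable_registers_to_ascii : List Char :=
  (PySem.List.pyRange 0 256 1).map (fun i => if 32 ≤ i ∧ i ≤ 126 then Char.ofNat i.toNat else '.')

def registers_to_ascii_alt (registers : List Int) : String :=
  let buf := registers.foldl (fun (acc : List Int) (reg : Int) =>
    acc ++ [PySem.Int.band ((reg >>> (8 : Nat) : Int)) 255, PySem.Int.band reg 255]) []
  -- bytes(buf).translate(table).decode('ascii'): table lookup per byte
  String.mk (buf.map (fun b => PySem.List.pyGetD pvTable_registers_to_ascii b '.'))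

-- ===== PRECONDITION & SPEC =====
def Spec_registers_to_ascii (registers : List Int) (out : String) : Prop := out = registers_to_ascii_alt registers
instance (registers : List Int) (out : String) : Decidable (Spec_registers_to_ascii registers out) := by unfold Spec_registers_to_ascii; infer_instance

-- ===== CLAIM (what is proved, stated in full; the proofs are below) =====
def Claim_equal_registers_to_ascii : Prop := ∀ (registers : List Int), Dom_registers_to_ascii registers → Spec_registers_to_ascii registers (registers_to_ascii registers)

-- ===== LEMMAS AND PROOFS =====

-- a & 0xFF lies in [0, 256) for every Python int a
theorem pv_band255_bounds (a : Int) :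
    0 ≤ PySem.Int.band a 255 ∧ PySem.Int.band a 255 < 256 := by
  unfold PySem.Int.band
  split_ifs with h1 h2 h3
  · have : a.toNat &&& (255 : Int).toNat ≤ (255 : Int).toNat := Nat.and_le_right
    omega
  · exact absurd (by norm_num) h2
  · have : (255 : Int).toNat &&& (-a - 1).toNat ≤ (255 : Int).toNat := Nat.and_le_left
    omega
  · exact absurd (by norm_num) h3

-- the table lookup at a byte value b computes A's if/else branch
theorem pv_table_lookup (b : Int) (h0 : 0 ≤ b) (h1 : b < 256) :
    PySem.List.pyGetD pvTable_registers_to_ascii b '.' =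
      (if 32 ≤ b ∧ b ≤ 126 then Char.ofNat b.toNat else '.') := by
  unfold pvTable_registers_to_ascii
  exact PySem.List.pyGetD_map_pyRange_of_nonneg _ 256 b '.' h0 h1

-- the two folds agree for any pair of accumulators related by the table lookup
theorem pv_fold_eq (registers : List Int) (accA : List Char) (accB : List Int)
    (h : accA = accB.map (fun b => PySem.List.pyGetD pvTable_registers_to_ascii b '.')) :
    registers.foldl (fun (acc : List Char) (reg : Int) =>
      let high_byte := PySem.Int.band ((reg >>> (8 : Nat) : Int)) 255
      let low_byte := PySem.Int.band reg 255
      let acc := acc ++ [if 32 ≤ high_byte ∧ high_byte ≤ 126 then Char.ofNat high_byte.toNat else '.']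
      acc ++ [if 32 ≤ low_byte ∧ low_byte ≤ 126 then Char.ofNat low_byte.toNat else '.']) accA
    = (registers.foldl (fun (acc : List Int) (reg : Int) =>
        acc ++ [PySem.Int.band ((reg >>> (8 : Nat) : Int)) 255, PySem.Int.band reg 255]) accB).map
        (fun b => PySem.List.pyGetD pvTable_registers_to_ascii b '.') := by
  induction registers generalizing accA accB with
  | nil => simpa using h
  | cons reg rest ih =>
    simp only [List.foldl_cons]
    apply ih
    have hh := pv_band255_bounds ((reg >>> (8 : Nat) : Int))
    have hl := pv_band255_bounds reg
    simp [h, pv_table_lookup _ hh.1 hh.2, pv_table_lookup _ hl.1 hl.2]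

-- ===== VERDICT (by name: the statement is the Claim_ definition above) =====
theorem registers_to_ascii_spec : Claim_equal_registers_to_ascii := by
  intro registers _
  unfold Spec_registers_to_ascii registers_to_ascii registers_to_ascii_alt
  simp only
  rw [pv_fold_eq registers [] [] (by simp)]
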